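-- pv_equiv track=rewrite | github.com/maver1ckfreex-ctrl/CT-project-Unibot | categorize function_version0x1.py | categorized
-- ===== SOURCE A (Python) =====
-- Library_1=['study','academic','book','scholarship','research','exam']
--
-- Library_2=['sports','sports','run','aikido','health','healthy','strong','play','basketball','tennis','swimming','football','Zumba','karate','yoga','waterpolo']
--
-- def categorized(tokens):
--     score_1=0
--     score_2=0
--     for token in tokens:
--         for words in Library_1:
--             if token==words:
--                 score_1+=1
--         for words in Library_2:
--             if token==words:
--                 score_2+=1
--     if score_1>score_2:
--         return 'study'
--     elif score_1<score_2:
--         return 'sports'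
--     else:
--         return 'unsure'
-- ===== SOURCE B (Python) =====
-- Library_1=['study','academic','book','scholarship','research','exam']
--
-- Library_2=['sports','sports','run','aikido','health','healthy','strong','play','basketball','tennis','swimming','football','Zumba','karate','yoga','waterpolo']
--
-- def categorized(tokens):
--     counts = {}
--     for t in tokens:
--         counts[t] = counts.get(t, 0) + 1
--     score_1 = sum(counts.get(w, 0) for w in Library_1)
--     score_2 = sum(counts.get(w, 0) for w in Library_2)
--     if score_1 > score_2:
--         return 'study'
--     elif score_1 < score_2:
--         return 'sports'
--     else:
--         return 'unsure'
-- ===== Notes on version B (the rewrite author's own statement) =====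
-- stated objective: faster
-- what changed: B builds a frequency table of the tokens once and then sums the counts of each library keyword against it, instead of A's nested loop comparing every token with every keyword.
import Mathlib
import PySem

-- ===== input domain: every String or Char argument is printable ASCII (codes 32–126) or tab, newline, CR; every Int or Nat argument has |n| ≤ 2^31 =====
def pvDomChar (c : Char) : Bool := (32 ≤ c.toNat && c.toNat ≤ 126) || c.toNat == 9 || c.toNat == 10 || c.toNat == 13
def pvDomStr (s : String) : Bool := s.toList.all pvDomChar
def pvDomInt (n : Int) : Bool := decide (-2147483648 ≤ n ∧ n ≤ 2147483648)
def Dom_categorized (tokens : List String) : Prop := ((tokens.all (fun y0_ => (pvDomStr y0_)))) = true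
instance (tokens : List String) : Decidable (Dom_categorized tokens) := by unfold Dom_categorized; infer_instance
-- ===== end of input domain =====

-- B replaces A's nested token×keyword comparison loops by a token frequency table summed over the keywords (objective: faster, constant-factor/asymptotic mechanism; return value proved identical).

def pvLibrary1 : List String := ["study", "academic", "book", "scholarship", "research", "exam"]

def pvLibrary2 : List String := ["sports", "sports", "run", "aikido", "health", "healthy", "strong", "play", "basketball", "tennis", "swimming", "football", "Zumba", "karate", "yoga", "waterpolo"]

-- ===== PORT A =====
def categorized (tokens : List String) : String :=
  let p : Int × Int := tokens.foldl
    (fun (p : Int × Int) token =>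
      let s1 := pvLibrary1.foldl (fun s words => if token == words then s + 1 else s) p.1
      let s2 := pvLibrary2.foldl (fun s words => if token == words then s + 1 else s) p.2
      (s1, s2)) (0, 0)
  if p.1 > p.2 then "study"
  else if p.1 < p.2 then "sports"
  else "unsure"

-- ===== PORT B =====
def categorized_alt (tokens : List String) : String :=
  let counts : PySem.Dict String Int :=
    tokens.foldl (fun d t => d.insert t (d.getD t 0 + 1)) PySem.Dict.empty
  let score1 : Int := pvLibrary1.foldl (fun s w => s + counts.getD w 0) 0
  let score2 : Int := pvLibrary2.foldl (fun s w => s + counts.getD w 0) 0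
  if score1 > score2 then "study"
  else if score1 < score2 then "sports"
  else "unsure"

-- ===== PRECONDITION & SPEC =====
def Spec_categorized (tokens : List String) (out : String) : Prop := out = categorized_alt tokens
instance (tokens : List String) (out : String) : Decidable (Spec_categorized tokens out) := by unfold Spec_categorized; infer_instance

-- ===== CLAIM (what is proved, stated in full; the proofs are below) =====
def Claim_equal_categorized : Prop := ∀ (tokens : List String), Dom_categorized tokens → Spec_categorized tokens (categorized tokens)

-- ===== LEMMAS AND PROOFS =====

-- A's inner loop over a library adds the library's count of the token.
theorem pv_inner (tok : String) : ∀ (lib : List String) (s : Int),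
    lib.foldl (fun s w => if tok == w then s + 1 else s) s = s + lib.count tok
  | [], s => by simp
  | w :: ws, s => by
    rw [List.foldl_cons]
    by_cases h : tok = w
    · subst h
      rw [if_pos (by simp), pv_inner tok ws, List.count_cons]
      simp
      ring
    · have h'' : (tok == w) = false := beq_eq_false_iff_ne.mpr h
      have h' : (w == tok) = false := beq_eq_false_iff_ne.mpr (fun e => h e.symm)
      rw [if_neg (by simp [h'']), pv_inner tok ws, List.count_cons, h']
      simp

-- Sum over a library of "is it this token" equals the library's count of the token.
theorem pv_indicator (tok : String) : ∀ (lib : List String),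
    (lib.map (fun w => if tok == w then (1 : Int) else 0)).sum = lib.count tok
  | [] => by simp
  | w :: ws => by
    rw [List.map_cons, List.sum_cons, pv_indicator tok ws, List.count_cons]
    by_cases h : tok = w
    · subst h
      simp
      ring
    · have h'' : (tok == w) = false := beq_eq_false_iff_ne.mpr h
      have h' : (w == tok) = false := beq_eq_false_iff_ne.mpr (fun e => h e.symm)
      rw [h', h'']
      simp

-- Exchange the two summation orders.
theorem pv_swap (lib : List String) : ∀ (tokens : List String),
    (tokens.map (fun t => (lib.count t : Int))).sum
      = (lib.map (fun w => (tokens.count w : Int))).sum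
  | [] => by simp
  | t :: ts => by
    have hsplit : (lib.map (fun w => ((t :: ts).count w : Int))).sum
        = (lib.map (fun w => (ts.count w : Int))).sum
          + (lib.map (fun w => if t == w then (1 : Int) else 0)).sum := by
      rw [← List.sum_map_add]
      refine congrArg List.sum (List.map_congr_left fun w _ => ?_)
      by_cases h : t = w
      · subst h; simp
      · have h'' : (t == w) = false := beq_eq_false_iff_ne.mpr h
        simp [List.count_cons, h'']
    rw [List.map_cons, List.sum_cons, hsplit, pv_indicator t lib, pv_swap lib ts]
    ring

-- A's outer loop computes the componentwise sums of library counts.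
theorem pv_outer : ∀ (tokens : List String) (a b : Int),
    tokens.foldl
      (fun (p : Int × Int) token =>
        (pvLibrary1.foldl (fun s words => if token == words then s + 1 else s) p.1,
         pvLibrary2.foldl (fun s words => if token == words then s + 1 else s) p.2)) (a, b)
      = (a + (tokens.map (fun t => (pvLibrary1.count t : Int))).sum,
         b + (tokens.map (fun t => (pvLibrary2.count t : Int))).sum)
  | [], a, b => by simp
  | t :: ts, a, b => by
    rw [List.foldl_cons]
    show List.foldl _
        (pvLibrary1.foldl (fun s words => if t == words then s + 1 else s) a,
         pvLibrary2.foldl (fun s words => if t == words then s + 1 else s) b) ts = _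
    rw [pv_inner t pvLibrary1 a, pv_inner t pvLibrary2 b, pv_outer ts,
      List.map_cons, List.sum_cons, List.map_cons, List.sum_cons]
    simp only [Prod.mk.injEq]
    exact ⟨by ring, by ring⟩

-- Folding "add f w" over a list sums f over the list.
theorem pv_foldl_add (f : String → Int) : ∀ (lib : List String) (s : Int),
    lib.foldl (fun s w => s + f w) s = s + (lib.map f).sum
  | [], s => by simp
  | w :: ws, s => by
    rw [List.foldl_cons, pv_foldl_add f ws, List.map_cons, List.sum_cons]
    ring

-- ===== VERDICT (by name: the statement is the Claim_ definition above) =====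
theorem categorized_spec : Claim_equal_categorized := by
  intro tokens _
  unfold Spec_categorized categorized categorized_alt
  simp only []
  rw [pv_outer tokens 0 0,
    pv_foldl_add (fun w =>
      (tokens.foldl (fun d t => d.insert t (d.getD t 0 + 1)) PySem.Dict.empty).getD w 0)
      pvLibrary1 0,
    pv_foldl_add (fun w =>
      (tokens.foldl (fun d t => d.insert t (d.getD t 0 + 1)) PySem.Dict.empty).getD w 0)
      pvLibrary2 0]
  simp only [PySem.Dict.foldl_insert_getD_add_one_eq_counter, PySem.Dict.getD_counter,
    pv_swap pvLibrary1 tokens, pv_swap pvLibrary2 tokens]
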